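-- pv_equiv track=rewrite | github.com/john35452/GFG_Weekly_Coding_Contest | gfg-weekly-coding-contest-105/Running Instructions.py | instructionCheck
-- ===== SOURCE A (Python) =====
-- from typing import List
--
-- def instructionCheck(m : int, n : int, k : List[int]) -> str:
--     # code here
--     current = set([0])
--     for i in range(n):
--         nextStep = set()
--         while current:
--             val = current.pop()
--             nextStep.add((val + k[i]) % m)
--             nextStep.add((val - k[i]) % m)
--         current, nextStep = nextStep, current
--
--     if 0 in current:
--         return "YES"
--     else:
--         return "NO"
-- ===== SOURCE B (Python) =====
-- from typing import List
--
-- def instructionCheck(m : int, n : int, k : List[int]) -> str: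
--     # Reachable residues kept as one integer bitmask; each step is two whole-set rotations.
--     mm = abs(m)
--     mask = (1 << mm) - 1
--     cur = 1
--     for i in range(n):
--         s = k[i] % mm
--         if s:
--             cur = (((cur << s) | (cur >> (mm - s))) | ((cur << (mm - s)) | (cur >> s))) & mask
--     return "YES" if cur & 1 else "NO"
-- ===== Notes on version B (the rewrite author's own statement) =====
-- stated objective: faster
-- what changed: B replaces A's explicit residue set with a per-element inner while-pop loop by a single integer bitmask of the reachable residues mod |m|, updated once per step with two whole-set bit rotations.
import Mathlib
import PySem

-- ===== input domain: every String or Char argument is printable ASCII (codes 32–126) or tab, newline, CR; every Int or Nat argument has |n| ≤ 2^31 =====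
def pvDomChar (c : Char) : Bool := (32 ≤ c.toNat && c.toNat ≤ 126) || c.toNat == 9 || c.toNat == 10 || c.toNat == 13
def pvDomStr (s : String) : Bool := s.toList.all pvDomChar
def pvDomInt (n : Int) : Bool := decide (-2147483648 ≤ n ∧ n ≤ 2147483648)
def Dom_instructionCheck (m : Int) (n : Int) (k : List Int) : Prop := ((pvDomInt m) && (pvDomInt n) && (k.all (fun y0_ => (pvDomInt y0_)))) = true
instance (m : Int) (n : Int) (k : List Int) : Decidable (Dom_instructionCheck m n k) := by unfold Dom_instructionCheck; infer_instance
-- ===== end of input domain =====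

-- B keeps the reachable-residue set as one integer bitmask and replaces A's per-element
-- inner while-pop loop by two whole-set rotations per step (objective: faster, constant-factor).

-- ===== PORT A =====
-- the 'while current: val = current.pop(); …' loop (result is order-independent: only set membership is used)
def pvPopLoop (m ki : Int) : List Int → PySem.Set Int → PySem.Set Int
  | [], next => next
  | v :: rest, next =>
      pvPopLoop m ki rest
        (PySem.Set.add (PySem.Set.add next (PySem.Int.mod (v + ki) m)) (PySem.Int.mod (v - ki) m))

def instructionCheck (m : Int) (n : Int) (k : List Int) : String :=
  let current : PySem.Set Int :=
    (PySem.List.pyRange 0 n 1).foldl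
      (fun cur i => pvPopLoop m (PySem.List.pyGetD k i 0) cur PySem.Set.empty)
      (PySem.Set.ofList [0])
  if 0 ∈ current then "YES" else "NO"

-- ===== PORT B =====
def pvRotStep (mm mask : Nat) (cur : Nat) (ki : Int) : Nat :=
  let s : Nat := (PySem.Int.mod ki (mm : Int)).toNat
  if s = 0 then cur
  else (((cur <<< s) ||| (cur >>> (mm - s))) ||| ((cur <<< (mm - s)) ||| (cur >>> s))) &&& mask

def instructionCheck_alt (m : Int) (n : Int) (k : List Int) : String :=
  let mm : Nat := m.natAbs
  let mask : Nat := (1 <<< mm) - 1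
  let cur : Nat :=
    (PySem.List.pyRange 0 n 1).foldl
      (fun cur i => pvRotStep mm mask cur (PySem.List.pyGetD k i 0)) 1
  if cur &&& 1 ≠ 0 then "YES" else "NO"

-- ===== PRECONDITION & SPEC =====
-- Pre_ excludes exactly the inputs where A raises: a positive loop count with m = 0
-- (ZeroDivisionError from 'k[i] % m') or with n > len(k) (IndexError on 'k[i]').
def Pre_instructionCheck (m : Int) (n : Int) (k : List Int) : Prop :=
  n ≤ 0 ∨ (m ≠ 0 ∧ n ≤ (k.length : Int))
instance (m : Int) (n : Int) (k : List Int) : Decidable (Pre_instructionCheck m n k) := by unfold Pre_instructionCheck; infer_instance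

def pvWitness_instructionCheck : Int × Int × List Int := (2, 2, [1, 1])

def Spec_instructionCheck (m : Int) (n : Int) (k : List Int) (out : String) : Prop := out = instructionCheck_alt m n k
instance (m : Int) (n : Int) (k : List Int) (out : String) : Decidable (Spec_instructionCheck m n k out) := by unfold Spec_instructionCheck; infer_instance

-- ===== CLAIM (what is proved, stated in full; the proofs are below) =====
def Claim_equal_instructionCheck : Prop := ∀ (m : Int) (n : Int) (k : List Int), Dom_instructionCheck m n k → Pre_instructionCheck m n k → Spec_instructionCheck m n k (instructionCheck m n k)

-- ===== LEMMAS AND PROOFS =====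

-- invariant tying A's residue set to B's bitmask: bit j is set iff some element of S is ≡ j (mod |m|)
def pvInv (mm : Nat) (S : List Int) (cur : Nat) : Prop :=
  ∀ j : Nat, (cur.testBit j = true) ↔ (j < mm ∧ ∃ x ∈ S, x % (mm : Int) = (j : Int))

-- every element of A's set is a Python-mod-m residue, i.e. lies in m's residue window
def pvRange (m : Int) (S : List Int) : Prop :=
  ∀ x ∈ S, (0 < m → 0 ≤ x ∧ x < m) ∧ (m < 0 → m < x ∧ x ≤ 0)

lemma pvModCongr (m : Int) (a : Int) :
    (PySem.Int.mod a m) % (m.natAbs : Int) = a % (m.natAbs : Int) := by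
  have hd : (m.natAbs : Int) ∣ m := ⟨m.sign, by rw [mul_comm]; exact (Int.sign_mul_natAbs m).symm⟩
  have h := PySem.Int.floordiv_mul_add_mod a m
  have hrw : PySem.Int.mod a m = a - PySem.Int.floordiv a m * m := by omega
  obtain ⟨c, hc⟩ := hd.mul_left (PySem.Int.floordiv a m)
  rw [hrw, hc, Int.sub_emod, Int.mul_emod_right, sub_zero, Int.emod_emod_of_dvd a dvd_rfl]

lemma pvMemPop (m ki : Int) (S next : List Int) (y : Int) :
    y ∈ pvPopLoop m ki S next ↔
      y ∈ next ∨ ∃ x ∈ S, y = PySem.Int.mod (x + ki) m ∨ y = PySem.Int.mod (x - ki) m := by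
  induction S generalizing next with
  | nil => simp [pvPopLoop]
  | cons v rest ih =>
      simp only [pvPopLoop, ih, PySem.Set.mem_add, List.mem_cons]
      constructor
      · rintro (((h | h) | h) | ⟨x, hx, h⟩)
        · exact Or.inl h
        · exact Or.inr ⟨v, Or.inl rfl, Or.inl h⟩
        · exact Or.inr ⟨v, Or.inl rfl, Or.inr h⟩
        · exact Or.inr ⟨x, Or.inr hx, h⟩
      · rintro (h | ⟨x, (rfl | hx), h⟩)
        · exact Or.inl (Or.inl (Or.inl h))
        · rcases h with h | h
          · exact Or.inl (Or.inl (Or.inr h))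
          · exact Or.inl (Or.inr h)
        · exact Or.inr ⟨x, hx, h⟩

lemma pvModIdx (mm r j s : Nat) (hr : r < mm) (hj : j < mm) (hs : s ≤ mm) :
    ((r + s) % mm = j ↔ r = (j + (mm - s)) % mm) := by
  have h1 : (r + s) % mm = if r + s < mm then r + s else r + s - mm := by
    split_ifs with h
    · exact Nat.mod_eq_of_lt h
    · rw [Nat.mod_eq_sub_mod (by omega), Nat.mod_eq_of_lt (by omega)]
  have h2 : (j + (mm - s)) % mm = if j + (mm - s) < mm then j + (mm - s) else j + (mm - s) - mm := by
    split_ifs with h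
    · exact Nat.mod_eq_of_lt h
    · rw [Nat.mod_eq_sub_mod (by omega), Nat.mod_eq_of_lt (by omega)]
  rw [h1, h2]; split_ifs <;> omega

lemma pvRotBit (mm s cur j : Nat) (h0 : 0 < s) (hs : s < mm) (hj : j < mm)
    (hb : ∀ t, cur.testBit t = true → t < mm) :
    ((cur <<< s) ||| (cur >>> (mm - s))).testBit j = cur.testBit ((j + (mm - s)) % mm) := by
  rw [Nat.testBit_or, Nat.testBit_shiftLeft, Nat.testBit_shiftRight]
  by_cases hcase : s ≤ j
  · have hmod : (j + (mm - s)) % mm = j - s := by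
      have hsub : j + (mm - s) - mm = j - s := by omega
      rw [Nat.mod_eq_sub_mod (by omega), hsub, Nat.mod_eq_of_lt (by omega)]
    have h2 : cur.testBit ((mm - s) + j) = false := by
      cases hcb : cur.testBit ((mm - s) + j) with
      | false => rfl
      | true => exact absurd (hb _ hcb) (by omega)
    rw [hmod]
    simp [hcase, h2]
  · have hmod : (j + (mm - s)) % mm = (mm - s) + j := by
      rw [Nat.mod_eq_of_lt (by omega)]; omega
    rw [hmod]
    simp [hcase]

lemma pvTestBitOne (j : Nat) : Nat.testBit 1 j = decide (j = 0) := by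
  cases j with
  | zero => rfl
  | succ t => rw [Nat.testBit_add_one]; simp

lemma pvStep (m : Int) (hm : m ≠ 0) (ki : Int) (S : List Int) (cur : Nat)
    (_hr : pvRange m S) (hinv : pvInv m.natAbs S cur) :
    pvRange m (pvPopLoop m ki S PySem.Set.empty) ∧
    pvInv m.natAbs (pvPopLoop m ki S PySem.Set.empty)
      (pvRotStep m.natAbs ((1 <<< m.natAbs) - 1) cur ki) := by
  have hmm : 0 < m.natAbs := Int.natAbs_pos.mpr hm
  set mm := m.natAbs with hmmdef
  have hposI : (0 : Int) < (mm : Int) := by exact_mod_cast hmm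
  constructor
  · -- range invariant
    intro y hy
    rw [pvMemPop] at hy
    rcases hy with h | ⟨x, _, h | h⟩
    · simp [PySem.Set.empty] at h
    all_goals {
      subst h
      refine ⟨fun hp => ?_, fun hn => ?_⟩
      · exact ⟨PySem.Int.mod_nonneg _ hp, PySem.Int.mod_lt _ hp⟩
      · exact PySem.Int.mod_neg_bounds _ hn }
  · -- bitmask invariant
    have hb : ∀ t, cur.testBit t = true → t < mm := fun t ht => ((hinv t).1 ht).1
    have hmodpos : PySem.Int.mod ki (mm : Int) = ki % (mm : Int) :=
      PySem.Int.mod_eq_emod_of_pos hposI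
    set s : Nat := (PySem.Int.mod ki (mm : Int)).toNat with hsdef
    have hscast : (s : Int) = ki % (mm : Int) := by
      rw [hsdef, hmodpos]; exact Int.toNat_of_nonneg (Int.emod_nonneg ki (by omega))
    have hslt : s < mm := by
      have h1 : (s : Int) < (mm : Int) := by
        rw [hscast]; exact Int.emod_lt_of_pos ki hposI
      exact_mod_cast h1
    -- membership characterisation of the new set, per residue class
    have hE : ∀ j : Nat, j < mm →
        ((∃ x ∈ pvPopLoop m ki S PySem.Set.empty, x % (mm : Int) = (j : Int)) ↔
          (cur.testBit ((j + (mm - s)) % mm) = true ∨ cur.testBit ((j + s) % mm) = true)) := by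
      intro j hj
      have ht1 : (j + (mm - s)) % mm < mm := Nat.mod_lt _ hmm
      have ht2 : (j + s) % mm < mm := Nat.mod_lt _ hmm
      have key : ∀ v : Int, ((PySem.Int.mod (v + ki) m) % (mm : Int) = (j : Int) ↔
            v % (mm : Int) = (((j + (mm - s)) % mm : Nat) : Int)) ∧
          ((PySem.Int.mod (v - ki) m) % (mm : Int) = (j : Int) ↔
            v % (mm : Int) = (((j + s) % mm : Nat) : Int)) := by
        intro v
        have hrnn : 0 ≤ v % (mm : Int) := Int.emod_nonneg v (by omega)
        have hrlt : v % (mm : Int) < (mm : Int) := Int.emod_lt_of_pos v hposI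
        set r : Nat := (v % (mm : Int)).toNat with hrdef
        have hrc : (r : Int) = v % (mm : Int) := Int.toNat_of_nonneg hrnn
        have hrltN : r < mm := by omega
        constructor
        · rw [pvModCongr m, Int.add_emod v ki, ← hrc, ← hscast]
          have : ((r : Int) + (s : Int)) % (mm : Int) = (((r + s) % mm : Nat) : Int) := by
            push_cast; ring_nf
          rw [this]
          norm_cast
          exact pvModIdx mm r j s hrltN hj hslt.le
        · rw [pvModCongr m, Int.sub_emod v ki, ← hrc, ← hscast]
          have hcast2 : ((r : Int) - (s : Int)) % (mm : Int) = (((r + (mm - s)) % mm : Nat) : Int) := by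
            have h1 : ((r : Int) - s) % (mm : Int) = ((r : Int) - s + mm) % (mm : Int) :=
              (Int.add_emod_right _ _).symm
            have h2 : (r : Int) - s + mm = ((r + (mm - s) : Nat) : Int) := by
              push_cast [Nat.cast_sub hslt.le]; ring
            rw [h1, h2]
            exact_mod_cast rfl
          rw [hcast2]
          norm_cast
          have hms : mm - (mm - s) = s := by omega
          have h := pvModIdx mm r j (mm - s) hrltN hj (by omega)
          rw [hms] at h
          exact h
      constructor
      · rintro ⟨y, hy, hyj⟩
        rw [pvMemPop] at hy
        rcases hy with h | ⟨x, hx, rfl | rfl⟩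
        · simp [PySem.Set.empty] at h
        · left
          exact ((hinv _).2 ⟨ht1, x, hx, ((key x).1.mp hyj)⟩)
        · right
          exact ((hinv _).2 ⟨ht2, x, hx, ((key x).2.mp hyj)⟩)
      · rintro (h | h)
        · obtain ⟨-, x, hx, hxr⟩ := (hinv _).1 h
          refine ⟨PySem.Int.mod (x + ki) m, ?_, (key x).1.mpr hxr⟩
          rw [pvMemPop]; exact Or.inr ⟨x, hx, Or.inl rfl⟩
        · obtain ⟨-, x, hx, hxr⟩ := (hinv _).1 h
          refine ⟨PySem.Int.mod (x - ki) m, ?_, (key x).2.mpr hxr⟩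
          rw [pvMemPop]; exact Or.inr ⟨x, hx, Or.inr rfl⟩
    intro j
    rw [pvRotStep]
    simp only [← hsdef]
    by_cases hj : j < mm
    · split_ifs with hs0
      · -- s = 0 : rotation is the identity on residues
        have e1 : (j + (mm - s)) % mm = j := by
          rw [hs0]; simp [Nat.add_mod_right, Nat.mod_eq_of_lt hj]
        have e2 : (j + s) % mm = j := by rw [hs0]; simp [Nat.mod_eq_of_lt hj]
        constructor
        · intro h
          exact ⟨hj, (hE j hj).mpr (Or.inl (by rw [e1]; exact h))⟩
        · rintro ⟨-, hex⟩
          rcases (hE j hj).mp hex with h | h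
          · rwa [e1] at h
          · rwa [e2] at h
      · -- s ≠ 0 : two genuine rotations
        have hspos : 0 < s := Nat.pos_of_ne_zero hs0
        rw [Nat.one_shiftLeft, Nat.testBit_and, Nat.testBit_two_pow_sub_one,
          Nat.testBit_or, pvRotBit mm s cur j hspos hslt hj hb]
        have hdown : ((cur <<< (mm - s)) ||| (cur >>> s)).testBit j
            = cur.testBit ((j + s) % mm) := by
          have hms : mm - (mm - s) = s := by omega
          have := pvRotBit mm (mm - s) cur j (by omega) (by omega) hj hb
          rw [hms] at this
          exact this
        rw [hdown]
        have hdj : decide (j < mm) = true := by simpa using hj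
        rw [hdj, Bool.and_true, Bool.or_eq_true]
        constructor
        · intro h; exact ⟨hj, (hE j hj).mpr h⟩
        · rintro ⟨-, hex⟩; exact (hE j hj).mp hex
    · -- j out of range: both sides false
      split_ifs with hs0
      · constructor
        · intro h; exact absurd (hb j h) hj
        · rintro ⟨hjm, -⟩; exact absurd hjm hj
      · rw [Nat.one_shiftLeft, Nat.testBit_and, Nat.testBit_two_pow_sub_one]
        simp only [hj, decide_false, Bool.and_false]
        constructor
        · intro h; cases h
        · rintro ⟨hjm, -⟩; exact hjm.elim

lemma pvFold (m : Int) (hm : m ≠ 0) (kv : List Int) (S : List Int) (cur : Nat)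
    (hr : pvRange m S) (hinv : pvInv m.natAbs S cur) :
    pvRange m (kv.foldl (fun S ki => pvPopLoop m ki S PySem.Set.empty) S) ∧
    pvInv m.natAbs (kv.foldl (fun S ki => pvPopLoop m ki S PySem.Set.empty) S)
      (kv.foldl (fun c ki => pvRotStep m.natAbs ((1 <<< m.natAbs) - 1) c ki) cur) := by
  induction kv generalizing S cur with
  | nil => exact ⟨hr, hinv⟩
  | cons a t ih =>
      obtain ⟨h1, h2⟩ := pvStep m hm a S cur hr hinv
      exact ih _ _ h1 h2

-- ===== VERDICT (by name: the statement is the Claim_ definition above) =====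
theorem instructionCheck_spec : Claim_equal_instructionCheck := by
  intro m n k _ hpre
  unfold Spec_instructionCheck instructionCheck instructionCheck_alt
  show (if (0 : Int) ∈ ((PySem.List.pyRange 0 n 1).foldl
      (fun cur i => pvPopLoop m (PySem.List.pyGetD k i 0) cur PySem.Set.empty)
      (PySem.Set.ofList [0])) then "YES" else "NO")
    = (if ((PySem.List.pyRange 0 n 1).foldl
      (fun cur i => pvRotStep m.natAbs ((1 <<< m.natAbs) - 1) cur (PySem.List.pyGetD k i 0)) 1) &&& 1 ≠ 0
      then "YES" else "NO")
  by_cases hn : n ≤ 0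
  · rw [PySem.List.pyRange_one_eq_nil hn]
    simp only [List.foldl_nil]
    have hA : (0 : Int) ∈ (PySem.Set.ofList [0] : PySem.Set Int) := by
      simp [PySem.Set.mem_ofList]
    have hB : ((1 : Nat) &&& 1 ≠ 0) := by simp
    rw [if_pos hA, if_pos hB]
  · obtain ⟨hm, -⟩ := hpre.resolve_left hn
    have hmm : 0 < m.natAbs := Int.natAbs_pos.mpr hm
    have hr0 : pvRange m [0] := by
      intro x hx
      simp only [List.mem_singleton] at hx
      subst hx
      exact ⟨fun h => ⟨le_refl 0, h⟩, fun h => ⟨h, le_refl 0⟩⟩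
    have hinv0 : pvInv m.natAbs [0] 1 := by
      intro j
      rw [pvTestBitOne]
      constructor
      · intro h
        have hj0 : j = 0 := by simpa using h
        subst hj0
        exact ⟨hmm, 0, by simp, by simp⟩
      · rintro ⟨-, x, hx, hxr⟩
        simp only [List.mem_singleton] at hx
        subst hx
        simp only [Int.zero_emod] at hxr
        simp [show j = 0 by exact_mod_cast hxr.symm]
    have heqA : (PySem.List.pyRange 0 n 1).foldl
        (fun cur i => pvPopLoop m (PySem.List.pyGetD k i 0) cur PySem.Set.empty)
        (PySem.Set.ofList [0])
        = ((PySem.List.pyRange 0 n 1).map (fun i => PySem.List.pyGetD k i 0)).foldl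
          (fun S ki => pvPopLoop m ki S PySem.Set.empty) (PySem.Set.ofList [0]) :=
      (List.foldl_map (f := fun i => PySem.List.pyGetD k i 0)
        (g := fun S ki => pvPopLoop m ki S PySem.Set.empty)
        (l := PySem.List.pyRange 0 n 1) (init := PySem.Set.ofList [0])).symm
    have heqB : (PySem.List.pyRange 0 n 1).foldl
        (fun cur i => pvRotStep m.natAbs ((1 <<< m.natAbs) - 1) cur (PySem.List.pyGetD k i 0)) 1
        = ((PySem.List.pyRange 0 n 1).map (fun i => PySem.List.pyGetD k i 0)).foldl
          (fun c ki => pvRotStep m.natAbs ((1 <<< m.natAbs) - 1) c ki) 1 :=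
      (List.foldl_map (f := fun i => PySem.List.pyGetD k i 0)
        (g := fun c ki => pvRotStep m.natAbs ((1 <<< m.natAbs) - 1) c ki)
        (l := PySem.List.pyRange 0 n 1) (init := (1 : Nat))).symm
    rw [heqA, heqB]
    set kv := (PySem.List.pyRange 0 n 1).map (fun i => PySem.List.pyGetD k i 0) with hkv
    obtain ⟨hr', hinv'⟩ := pvFold m hm kv [0] 1 hr0 hinv0
    set S' := kv.foldl (fun S ki => pvPopLoop m ki S PySem.Set.empty) [0] with hS'
    set cur' := kv.foldl (fun c ki => pvRotStep m.natAbs ((1 <<< m.natAbs) - 1) c ki) 1 with hcur'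
    have hbit0 : (cur' &&& 1 ≠ 0) ↔ cur'.testBit 0 = true := by
      rw [Nat.and_one_is_mod, Nat.testBit_zero]
      simp only [ne_eq, decide_eq_true_eq]
      omega
    have hmem : (0 : Int) ∈ S' ↔ cur'.testBit 0 = true := by
      rw [hinv' 0]
      constructor
      · intro h; exact ⟨hmm, 0, h, by simp⟩
      · rintro ⟨-, x, hx, hxr⟩
        push_cast at hxr
        -- x % |m| = 0 together with x in m's residue window forces x = 0
        have hbnd := hr' x hx
        rcases lt_or_gt_of_ne hm with hneg | hpos
        · obtain ⟨hlo, hhi⟩ := hbnd.2 hneg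
          have habs : |m| = -m := abs_of_neg hneg
          by_cases hx0 : x = 0
          · rwa [hx0] at hx
          · exfalso
            have h1 : x % |m| = x + |m| := by
              rw [← Int.add_emod_right x |m|]
              exact Int.emod_eq_of_lt (by omega) (by omega)
            omega
        · obtain ⟨hlo, hhi⟩ := hbnd.1 hpos
          have habs : |m| = m := abs_of_pos hpos
          have h1 : x % |m| = x := Int.emod_eq_of_lt hlo (by omega)
          have hx0 : x = 0 := by omega
          rwa [hx0] at hx
    have : ((0 : Int) ∈ S') ↔ (cur' &&& 1 ≠ 0) := by rw [hmem, hbit0]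
    split_ifs with h1 h2 h2
    · rfl
    · exact absurd (this.mp h1) h2
    · exact absurd (this.mpr h2) h1
    · rfl
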